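-- pv_equiv track=rewrite | github.com/GizawAAiT/Codeforces | A_Sushi_for_Two.py | max_sushi_no_extra_space
-- ===== SOURCE A (Python) =====
-- def max_sushi_no_extra_space(t):
--     n = len(t)
--     best = 0
--     prev_len = 0
--     cur_len = 1
--
--     for i in range(1, n):
--         if t[i] == t[i - 1]:
--             cur_len += 1
--         else:
--             best = max(best, 2 * min(prev_len, cur_len))
--             prev_len = cur_len
--             cur_len = 1
--
--     best = max(best, 2 * min(prev_len, cur_len))
--     return best
-- ===== SOURCE B (Python) =====
-- def max_sushi_no_extra_space(t):
--     # run-length encode t, then combine adjacent run pairs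
--     runs = []
--     prev = None
--     for x in t:
--         if runs and x == prev:
--             runs[-1] += 1
--         else:
--             runs.append(1)
--         prev = x
--     return max((2 * min(a, b) for a, b in zip(runs, runs[1:])), default=0)
-- ===== Notes on version B (the rewrite author's own statement) =====
-- stated objective: simpler
-- what changed: B first builds the run-length encoding of t as an explicit list of run lengths and then takes max(2*min(a,b)) over adjacent run pairs in a second pass, replacing A's single fused loop that tracks prev_len/cur_len and flushes at boundaries.
import Mathlib
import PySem

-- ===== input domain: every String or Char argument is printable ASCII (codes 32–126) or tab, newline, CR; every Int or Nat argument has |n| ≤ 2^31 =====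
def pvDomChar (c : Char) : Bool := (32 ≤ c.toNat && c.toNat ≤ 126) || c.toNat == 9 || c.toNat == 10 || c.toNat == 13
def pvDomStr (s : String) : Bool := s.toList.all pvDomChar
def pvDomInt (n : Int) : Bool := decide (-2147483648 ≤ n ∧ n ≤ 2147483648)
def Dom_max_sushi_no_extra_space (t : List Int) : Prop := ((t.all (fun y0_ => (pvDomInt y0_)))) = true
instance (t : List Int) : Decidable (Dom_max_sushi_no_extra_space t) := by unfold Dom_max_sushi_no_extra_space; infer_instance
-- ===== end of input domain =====

-- B builds the run-length encoding explicitly and then folds over adjacent run pairs,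
-- replacing A's single fused loop (objective: simpler decomposition; same O(n) cost).


-- ===== PORT A =====
-- A's for-loop over i in range(1, n) comparing t[i] with t[i-1], carried as a
-- recursion over the remaining elements with the previous element in the state
-- (best, prev_len, cur_len, prevElem); the final flush is the [] case.
def aLoop (best prev_len cur_len prevElem : Int) : List Int → Int
  | [] => max best (2 * min prev_len cur_len)
  | x :: xs =>
    if x = prevElem then aLoop best prev_len (cur_len + 1) x xs
    else aLoop (max best (2 * min prev_len cur_len)) cur_len 1 x xs

def max_sushi_no_extra_space (t : List Int) : Int :=
  match t with
  | [] => max 0 (2 * min (0 : Int) 1)   -- empty loop, then the final flush with best=0, prev_len=0, cur_len=1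
  | x :: xs => aLoop 0 0 1 x xs

-- ===== PORT B =====
-- Source B's first loop: state (runs, prev); 'runs[-1] += 1' is dropLast ++ [last+1].
def bStep (st : List Int × Option Int) (x : Int) : List Int × Option Int :=
  if st.1 ≠ [] ∧ st.2 = some x then (st.1.dropLast ++ [st.1.getLastD 0 + 1], some x)
  else (st.1 ++ [1], some x)

def max_sushi_no_extra_space_alt (t : List Int) : Int :=
  let runs := (t.foldl bStep ([], none)).1
  ((runs.zip (runs.drop 1)).foldl (fun b p => max b (2 * min p.1 p.2)) 0)

-- ===== PRECONDITION & SPEC =====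
def Spec_max_sushi_no_extra_space (t : List Int) (out : Int) : Prop := out = max_sushi_no_extra_space_alt t
instance (t : List Int) (out : Int) : Decidable (Spec_max_sushi_no_extra_space t out) := by unfold Spec_max_sushi_no_extra_space; infer_instance

-- ===== CLAIM (what is proved, stated in full; the proofs are below) =====
def Claim_equal_max_sushi_no_extra_space : Prop := ∀ (t : List Int), Dom_max_sushi_no_extra_space t → Spec_max_sushi_no_extra_space t (max_sushi_no_extra_space t)

-- ===== LEMMAS AND PROOFS =====

-- proof-side run-length encoding with current element c and current count k
def rle (c k : Int) : List Int → List Int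
  | [] => [k]
  | x :: xs => if x = c then rle c (k + 1) xs else k :: rle x 1 xs

def pairStep (b : Int) (p : Int × Int) : Int := max b (2 * min p.1 p.2)

lemma bfold_eq_rle (xs : List Int) : ∀ (rs : List Int) (c k : Int),
    (xs.foldl bStep (rs ++ [k], some c)).1 = rs ++ rle c k xs := by
  induction xs with
  | nil => intro rs c k; simp [rle]
  | cons x xs ih =>
    intro rs c k
    rw [List.foldl_cons]
    by_cases h : x = c
    · subst h
      have hb : bStep (rs ++ [k], some x) x = (rs ++ [k + 1], some x) := by
        unfold bStep
        rw [if_pos ⟨by simp, rfl⟩]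
        simp
      rw [hb, ih rs x (k + 1)]
      simp [rle]
    · have hb : bStep (rs ++ [k], some c) x = ((rs ++ [k]) ++ [1], some x) := by
        unfold bStep
        rw [if_neg]
        rintro ⟨-, hc⟩
        simp only [Option.some.injEq] at hc
        exact h hc.symm
      rw [hb, ih (rs ++ [k]) x 1]
      simp [rle, h]

-- the head of rle c k xs is at least k
lemma rle_head (xs : List Int) : ∀ (c k : Int), ∃ h rest, rle c k xs = h :: rest ∧ k ≤ h := by
  induction xs with
  | nil => intro c k; exact ⟨k, [], rfl, le_refl _⟩
  | cons x xs ih =>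
    intro c k
    by_cases hx : x = c
    · obtain ⟨h, rest, heq, hle⟩ := ih c (k + 1)
      exact ⟨h, rest, by simp [rle, hx, heq], by omega⟩
    · exact ⟨k, rle x 1 xs, by simp [rle, hx], le_refl _⟩

-- A's fused loop equals the pair-fold over (prev_len :: rle prevElem cur_len xs)
lemma aLoop_eq_pairfold (xs : List Int) : ∀ (best prev cur c : Int),
    aLoop best prev cur c xs =
      (((prev :: rle c cur xs).zip (rle c cur xs)).foldl pairStep best) := by
  induction xs with
  | nil => intro best prev cur c; simp [aLoop, rle, pairStep]
  | cons x xs ih =>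
    intro best prev cur c
    by_cases hx : x = c
    · subst hx
      show (if x = x then aLoop best prev (cur + 1) x xs else _) =
          ((prev :: rle x cur (x :: xs)).zip (rle x cur (x :: xs))).foldl pairStep best
      rw [if_pos rfl]
      have hr : rle x cur (x :: xs) = rle x (cur + 1) xs := if_pos rfl
      rw [hr]
      exact ih best prev (cur + 1) x
    · simp only [aLoop, rle, if_neg hx]
      rw [ih (max best (2 * min prev cur)) cur 1 x]
      simp [pairStep]

theorem max_sushi_no_extra_space_spec_aux (t : List Int) :
    max_sushi_no_extra_space t = max_sushi_no_extra_space_alt t := by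
  cases t with
  | nil => simp [max_sushi_no_extra_space, max_sushi_no_extra_space_alt]
  | cons x xs =>
    have hruns : ((x :: xs).foldl bStep ([], none)).1 = rle x 1 xs := by
      have h1 : (x :: xs).foldl bStep ([], none) = xs.foldl bStep (([] : List Int) ++ [1], some x) := by
        simp [List.foldl_cons, bStep]
      rw [h1, bfold_eq_rle xs [] x 1]
      simp
    simp only [max_sushi_no_extra_space, max_sushi_no_extra_space_alt, hruns]
    rw [aLoop_eq_pairfold xs 0 0 1 x]
    obtain ⟨h, rest, heq, hle⟩ := rle_head xs x 1
    rw [heq]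
    have hfun : (fun (b : Int) (p : Int × Int) => max b (2 * min p.1 p.2)) = pairStep := rfl
    rw [List.drop_one, List.tail_cons, hfun]
    simp only [List.zip_cons_cons, List.foldl_cons]
    have h0 : pairStep 0 (0, h) = 0 := by simp only [pairStep]; omega
    rw [h0]

-- ===== VERDICT (by name: the statement is the Claim_ definition above) =====
theorem max_sushi_no_extra_space_spec : Claim_equal_max_sushi_no_extra_space := by
  intro t _
  exact max_sushi_no_extra_space_spec_aux t
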